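-- pv_equiv track=rewrite | github.com/CAMANEM/CE-TEC-2015 | Intro y Taller de Programacion/Examenes/I Parcial 2015/Pablo David Garcia Brenes Parcial I.py | div0
-- ===== SOURCE A (Python) =====
-- def div0(Hilera):
--     if Hilera==[]: #Agregue ==
--         return 0 #Cambie Hilera por 0
--     else:
--         if Hilera[0]==0:
--             return 1+div0(Hilera[1:])
--         else:
--             return div0(Hilera[1:])
-- ===== SOURCE B (Python) =====
-- def div0(Hilera):
--     c = 0
--     for x in Hilera:
--         if x == 0:
--             c += 1
--     return c
-- ===== Notes on version B (the rewrite author's own statement) =====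
-- stated objective: faster
-- what changed: Replaced A's linear recursion over tail slices (each step copies the remaining list) with a single iterative loop that increments an accumulator when an element is zero.
import Mathlib
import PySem

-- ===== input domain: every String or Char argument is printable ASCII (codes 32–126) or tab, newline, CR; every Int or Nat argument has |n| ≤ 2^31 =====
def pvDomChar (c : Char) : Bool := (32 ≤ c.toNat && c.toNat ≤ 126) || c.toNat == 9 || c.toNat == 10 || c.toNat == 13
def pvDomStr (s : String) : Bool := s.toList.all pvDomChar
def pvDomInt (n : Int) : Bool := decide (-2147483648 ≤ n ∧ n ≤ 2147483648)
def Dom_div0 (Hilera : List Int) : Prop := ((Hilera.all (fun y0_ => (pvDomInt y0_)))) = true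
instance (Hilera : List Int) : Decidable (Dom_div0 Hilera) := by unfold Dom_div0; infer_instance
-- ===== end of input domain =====

-- B replaces A's recursion over tail slices with one iterative accumulator loop (objective: simpler).

-- ===== PORT A =====
-- Literal transliteration of A: base case on [], recurse on the tail slice Hilera[1:].
def div0 (Hilera : List Int) : Int :=
  if Hilera = [] then 0
  else
    if (Hilera.headI) = 0 then 1 + div0 (PySem.List.slice Hilera (some 1) none)
    else div0 (PySem.List.slice Hilera (some 1) none)
termination_by Hilera.length
decreasing_by
  all_goals
    cases Hilera with
    | nil => simp_all
    | cons a t => simp [PySem.List.slice_from_one]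

-- ===== PORT B =====
-- Literal transliteration of B: fold the loop's counter state over the list.
def div0_alt (Hilera : List Int) : Int :=
  Hilera.foldl (fun c x => if x = 0 then c + 1 else c) 0

-- ===== PRECONDITION & SPEC =====
def Spec_div0 (Hilera : List Int) (out : Int) : Prop := out = div0_alt Hilera
instance (Hilera : List Int) (out : Int) : Decidable (Spec_div0 Hilera out) := by unfold Spec_div0; infer_instance

-- ===== CLAIM (what is proved, stated in full; the proofs are below) =====
def Claim_equal_div0 : Prop := ∀ (Hilera : List Int), Dom_div0 Hilera → Spec_div0 Hilera (div0 Hilera)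

-- ===== LEMMAS AND PROOFS =====

theorem div0_alt_shift (c : Int) (xs : List Int) :
    xs.foldl (fun c x => if x = 0 then c + 1 else c) c
      = c + xs.foldl (fun c x => if x = 0 then c + 1 else c) 0 := by
  induction xs generalizing c with
  | nil => simp
  | cons a t ih =>
    simp only [List.foldl_cons]
    rw [ih, ih (if a = 0 then 0 + 1 else 0)]
    split_ifs <;> ring

theorem div0_eq_alt (xs : List Int) : div0 xs = div0_alt xs := by
  induction xs with
  | nil => simp [div0, div0_alt]
  | cons a t ih =>
    rw [div0]
    have hs : PySem.List.slice (a :: t) (some 1) none = t := by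
      simp [PySem.List.slice_from_one]
    rw [if_neg (List.cons_ne_nil a t), hs]
    simp only [List.headI]
    by_cases h : a = 0
    · rw [if_pos h, ih]
      simp only [div0_alt, List.foldl_cons, if_pos h, zero_add]
      rw [div0_alt_shift 1 t]
    · rw [if_neg h, ih]
      simp only [div0_alt, List.foldl_cons, if_neg h]

-- ===== VERDICT (by name: the statement is the Claim_ definition above) =====
theorem div0_spec : Claim_equal_div0 := by
  intro xs _
  exact div0_eq_alt xs
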